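-- pv_equiv track=rewrite | github.com/QubesOS/qubesos.github.io | _utils/_translation_utils/merge_md_heading_ids.py | generate_unique_placeholder
-- ===== SOURCE A (Python) =====
-- def generate_unique_placeholder(rendered_html_lines):
--     number = 0
--     PREFIX = 'xq'
--     SUFFIX = 'z'
--     result = ''
--     while True:
--         result = PREFIX + str(number) + SUFFIX
--         solution_found = True
--         for line in rendered_html_lines:
--             if result in line:
--                 number += 1
--                 solution_found = False
--                 break
--         if solution_found:
--             break
--     # we assume that there will be at least one solution
--     return result
-- ===== SOURCE B (Python) =====
-- def generate_unique_placeholder(rendered_html_lines):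
--     # One linear scan: collect every number n whose canonical decimal form
--     # appears as 'xq<digits>z' in some line, then return 'xq<mex>z' where
--     # mex is the smallest number not collected.
--     present = set()
--     for line in rendered_html_lines:
--         n = len(line)
--         i = 0
--         while i + 1 < n:
--             if line[i] == 'x' and line[i + 1] == 'q':
--                 j = i + 2
--                 while j < n and '0' <= line[j] <= '9':
--                     j += 1
--                 if j > i + 2 and j < n and line[j] == 'z':
--                     d = line[i + 2:j]
--                     if len(d) == 1 or d[0] != '0':
--                         present.add(int(d))
--             i += 1
--     k = 0
--     for v in sorted(present):
--         if v == k: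
--             k += 1
--         elif v > k:
--             break
--     return 'xq' + str(k) + 'z'
-- ===== Notes on version B (the rewrite author's own statement) =====
-- stated objective: alternative
-- what changed: Instead of re-testing candidate substrings 'xq0z','xq1z',... against all lines until one is absent, B scans all lines once, collecting every number whose canonical 'xq<digits>z' form occurs, and returns 'xq<k>z' for the smallest missing k.
import Mathlib
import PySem

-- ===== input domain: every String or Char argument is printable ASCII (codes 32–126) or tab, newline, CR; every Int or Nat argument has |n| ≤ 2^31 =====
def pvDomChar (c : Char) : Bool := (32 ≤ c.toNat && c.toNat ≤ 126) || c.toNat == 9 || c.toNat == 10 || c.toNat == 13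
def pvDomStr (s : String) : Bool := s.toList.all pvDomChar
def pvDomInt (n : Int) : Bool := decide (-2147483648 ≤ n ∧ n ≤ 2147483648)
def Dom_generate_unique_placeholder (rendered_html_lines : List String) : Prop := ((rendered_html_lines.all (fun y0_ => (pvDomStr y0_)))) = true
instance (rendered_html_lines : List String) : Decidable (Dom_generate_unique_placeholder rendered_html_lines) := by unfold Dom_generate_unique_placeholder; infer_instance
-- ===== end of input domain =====

-- A retries candidate substrings 'xq0z','xq1z',… rescanning all lines per candidate; B scans the
-- lines once, collecting every number whose canonical 'xq<digits>z' form occurs, and returns the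
-- smallest missing one (alternative algorithm, one pass over the text).

-- ===== PORT A =====
-- A's 'while True' loop, as recursion on a fuel counter. The fuel is a totality guard only (at most
-- one candidate number can start at each character position, so at most (total chars) candidates are
-- ever contained and the proof below shows the fuel is never exhausted). 'PREFIX + str(number) +
-- SUFFIX' is built at char level (exact for string concatenation).
def pvLoopA (rendered_html_lines : List String) : Nat → Int → String
  | 0, number => String.ofList ('x' :: 'q' :: (PySem.Int.toChars number ++ ['z']))
  | fuel + 1, number =>
      -- 'for line in rendered_html_lines: if result in line: number += 1; break'
      if rendered_html_lines.any (fun line =>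
          PySem.Str.isIn (String.ofList ('x' :: 'q' :: (PySem.Int.toChars number ++ ['z']))) line) then
        pvLoopA rendered_html_lines fuel (number + 1)
      else
        String.ofList ('x' :: 'q' :: (PySem.Int.toChars number ++ ['z']))

def generate_unique_placeholder (rendered_html_lines : List String) : String :=
  pvLoopA rendered_html_lines ((rendered_html_lines.map (fun l => l.toList.length)).sum + 1) 0

-- ===== PORT B =====
-- int(d) on a pure digit string, as a left fold (exact for digit-only strings, the only use in Source B)
def pvVal (ds : List Char) : Nat := ds.foldl (fun a c => 10 * a + (c.toNat - 48)) 0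

-- Source B's match attempt at position i: "line[i]=='x' and line[i+1]=='q'", the digit run line[i+2:j],
-- the following 'z', and the no-leading-zero test
def pvHead? : List Char → Option Int
  | c1 :: c2 :: rest =>
      if c1 = 'x' ∧ c2 = 'q' then
        if rest.takeWhile Char.isDigit ≠ [] ∧ (rest.dropWhile Char.isDigit).head? = some 'z' ∧
            ((rest.takeWhile Char.isDigit).length = 1 ∨ (rest.takeWhile Char.isDigit).head? ≠ some '0')
        then some ((pvVal (rest.takeWhile Char.isDigit) : Nat) : Int)
        else none
      else none
  | _ => none

-- Source B's per-line scan 'while i + 1 < n: … i += 1', as structural recursion over the characters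
def pvScanLine : List Char → List Int
  | [] => []
  | c :: cs =>
      match pvHead? (c :: cs) with
      | some v => v :: pvScanLine cs
      | none => pvScanLine cs

-- 'k = 0; for v in sorted(present): if v == k: k += 1; elif v > k: break'
def pvMex : List Int → Int → Int
  | [], k => k
  | v :: vs, k => if v = k then pvMex vs (k + 1) else if k < v then k else pvMex vs k

def generate_unique_placeholder_alt (rendered_html_lines : List String) : String :=
  let present : PySem.Set Int :=
    rendered_html_lines.foldl
      (fun s line => (pvScanLine line.toList).foldl (fun s v => PySem.Set.add s v) s)
      (PySem.Set.ofList [])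
  let k := pvMex (PySem.List.sorted present (fun v => v)) 0
  String.ofList ('x' :: 'q' :: (PySem.Int.toChars k ++ ['z']))

-- ===== PRECONDITION & SPEC =====
def Spec_generate_unique_placeholder (rendered_html_lines : List String) (out : String) : Prop := out = generate_unique_placeholder_alt rendered_html_lines
instance (rendered_html_lines : List String) (out : String) : Decidable (Spec_generate_unique_placeholder rendered_html_lines out) := by unfold Spec_generate_unique_placeholder; infer_instance

-- ===== CLAIM (what is proved, stated in full; the proofs are below) =====
def Claim_equal_generate_unique_placeholder : Prop := ∀ (rendered_html_lines : List String), Dom_generate_unique_placeholder rendered_html_lines → Spec_generate_unique_placeholder rendered_html_lines (generate_unique_placeholder rendered_html_lines)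

-- ===== LEMMAS AND PROOFS =====

-- the candidate char list A tests for number n
def pvCand (n : Int) : List Char := 'x' :: 'q' :: (PySem.Int.toChars n ++ ['z'])

-- ---- character facts ----
lemma pvDigit_bounds (c : Char) (h : c.isDigit) : 48 ≤ c.toNat ∧ c.toNat ≤ 57 := by
  simp [Char.isDigit, UInt32.le_iff_toNat_le] at h
  exact ⟨h.1, h.2⟩

lemma pvDigitChar_isDigit (k : Nat) (h : k < 10) : (Nat.digitChar k).isDigit := by
  interval_cases k <;> decide

lemma pvDigitChar_toNat (k : Nat) (h : k < 10) : (Nat.digitChar k).toNat = k + 48 := by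
  interval_cases k <;> decide

lemma pvDigitChar_ne_zero (k : Nat) (h : k < 10) (h0 : 0 < k) : Nat.digitChar k ≠ '0' := by
  interval_cases k <;> decide

lemma pvChar_eq_of_toNat (c d : Char) (h : c.toNat = d.toNat) : c = d :=
  Char.ext (UInt32.toNat_inj.mp h)

lemma pvDigitChar_round (c : Char) (h : c.isDigit) : Nat.digitChar (c.toNat - 48) = c := by
  obtain ⟨h1, h2⟩ := pvDigit_bounds c h
  apply pvChar_eq_of_toNat
  rw [pvDigitChar_toNat _ (by omega)]
  omega

-- ---- Nat.toDigits 10 facts: nonempty, all digits, no leading zero, and the pvVal round trips ----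
lemma pvTD_ne_nil (m : Nat) : Nat.toDigits 10 m ≠ [] := by
  rw [Nat.toDigits_eq_if (by norm_num)]
  split <;> simp

lemma pvTD_digits (m : Nat) : ∀ c ∈ Nat.toDigits 10 m, c.isDigit := by
  induction m using Nat.strong_induction_on with
  | _ m ih =>
    rw [Nat.toDigits_eq_if (by norm_num)]
    split
    · next h => intro c hc; simp at hc; subst hc; exact pvDigitChar_isDigit m h
    · next h =>
      intro c hc
      rcases List.mem_append.mp hc with h1 | h1
      · exact ih (m / 10) (by omega) c h1
      · simp at h1; subst h1; exact pvDigitChar_isDigit _ (Nat.mod_lt _ (by norm_num))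

lemma pvTD_head (m : Nat) (hm : 0 < m) : (Nat.toDigits 10 m).head? ≠ some '0' := by
  induction m using Nat.strong_induction_on with
  | _ m ih =>
    rw [Nat.toDigits_eq_if (by norm_num)]
    split
    · next h =>
      simp
      exact pvDigitChar_ne_zero m h hm
    · next h =>
      have hne := pvTD_ne_nil (m / 10)
      rw [List.head?_append_of_ne_nil _ hne]
      exact ih (m / 10) (by omega) (by omega)

lemma pvVal_append_singleton (l : List Char) (c : Char) :
    pvVal (l ++ [c]) = 10 * pvVal l + (c.toNat - 48) := by
  simp [pvVal, List.foldl_append]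

lemma pvVal_ge (t : List Char) : ∀ a : Nat, a ≤ t.foldl (fun a c => 10 * a + (c.toNat - 48)) a := by
  induction t with
  | nil => intro a; simp
  | cons c t ih =>
    intro a
    calc a ≤ 10 * a + (c.toNat - 48) := by omega
    _ ≤ _ := by simpa [List.foldl_cons] using ih (10 * a + (c.toNat - 48))

lemma pvVal_pos (l : List Char) (hne : l ≠ []) (hd : ∀ c ∈ l, c.isDigit)
    (h0 : l.head? ≠ some '0') : 1 ≤ pvVal l := by
  obtain ⟨c, t, rfl⟩ := List.exists_cons_of_ne_nil hne
  have hc : c.isDigit := hd c (by simp)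
  have hb := pvDigit_bounds c hc
  have hcne : c ≠ '0' := by simpa using h0
  have hc48 : c.toNat ≠ 48 := by
    intro h; exact hcne (pvChar_eq_of_toNat c '0' (by simpa using h))
  calc (1 : Nat) ≤ 10 * 0 + (c.toNat - 48) := by omega
  _ ≤ _ := by simpa [pvVal, List.foldl_cons] using pvVal_ge t (10 * 0 + (c.toNat - 48))

lemma pvTD_val (m : Nat) : pvVal (Nat.toDigits 10 m) = m := by
  induction m using Nat.strong_induction_on with
  | _ m ih =>
    rw [Nat.toDigits_eq_if (by norm_num)]
    split
    · next h =>
      simp [pvVal, pvDigitChar_toNat m h]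
    · next h =>
      rw [pvVal_append_singleton, ih (m / 10) (by omega),
        pvDigitChar_toNat _ (Nat.mod_lt _ (by norm_num))]
      omega

lemma pvTD_of_canon (ds : List Char) (hne : ds ≠ []) (hd : ∀ c ∈ ds, c.isDigit)
    (hcanon : ds.length = 1 ∨ ds.head? ≠ some '0') :
    Nat.toDigits 10 (pvVal ds) = ds := by
  induction ds using List.reverseRecOn with
  | nil => exact absurd rfl hne
  | append_singleton l c ih =>
    have hc : c.isDigit := hd c (by simp)
    have hb := pvDigit_bounds c hc
    rcases eq_or_ne l [] with rfl | hl
    · have h1 : pvVal ([] ++ [c]) = c.toNat - 48 := by simp [pvVal]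
      rw [h1, Nat.toDigits_of_lt_base (by omega), pvDigitChar_round c hc]
      simp
    · have hdl : ∀ x ∈ l, x.isDigit := fun x hx => hd x (by simp [hx])
      have hlen : (l ++ [c]).length ≠ 1 := by
        obtain ⟨a, t, rfl⟩ := List.exists_cons_of_ne_nil hl
        simp
      have hh : l.head? ≠ some '0' := by
        rcases hcanon with h | h
        · exact absurd h hlen
        · rwa [List.head?_append_of_ne_nil _ hl] at h
      have hpos : 1 ≤ pvVal l := pvVal_pos l hl hdl hh
      rw [pvVal_append_singleton]
      rw [← Nat.toDigits_append_toDigits (by norm_num) (by omega) (by omega : c.toNat - 48 < 10)]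
      rw [ih hl hdl (Or.inr hh), Nat.toDigits_of_lt_base (by omega), pvDigitChar_round c hc]

lemma pvToChars_nonneg (n : Int) (hn : 0 ≤ n) :
    PySem.Int.toChars n = Nat.toDigits 10 n.toNat := by
  simp [PySem.Int.toChars, not_lt.mpr hn]

lemma pvCand_len (n : Int) : 3 ≤ (pvCand n).length := by
  simp [pvCand]

lemma pvTW (l t : List Char) (h : ∀ x ∈ l, x.isDigit) :
    (l ++ 'z' :: t).takeWhile Char.isDigit = l := by
  rw [List.takeWhile_append]; simp_all

lemma pvDW (l t : List Char) (h : ∀ x ∈ l, x.isDigit) :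
    (l ++ 'z' :: t).dropWhile Char.isDigit = 'z' :: t := by
  have h1 : l.dropWhile Char.isDigit = [] := List.dropWhile_eq_nil_iff.mpr h
  rw [List.dropWhile_append, h1]
  simp

-- ---- Source B's head match finds exactly the candidates that are prefixes ----
lemma pvHead?_iff (cs : List Char) (n : Int) :
    pvHead? cs = some n ↔ 0 ≤ n ∧ pvCand n <+: cs := by
  match cs with
  | [] =>
    simp [pvHead?, List.prefix_nil, pvCand]
  | [c] =>
    simp only [pvHead?]
    constructor
    · intro h; exact absurd h (by simp)
    · rintro ⟨hn, hpre⟩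
      have h1 : (pvCand n).length ≤ 1 := by simpa using hpre.length_le
      have h2 := pvCand_len n
      omega
  | c1 :: c2 :: rest =>
    by_cases hxq : c1 = 'x' ∧ c2 = 'q'
    · obtain ⟨rfl, rfl⟩ := hxq
      rw [pvHead?]
      rw [if_pos (⟨rfl, rfl⟩ : ('x' : Char) = 'x' ∧ ('q' : Char) = 'q')]
      constructor
      · intro h
        split at h
        · next hcond =>
          obtain ⟨hne, hz, hcanon⟩ := hcond
          injection h with h
          subst h
          refine ⟨Int.natCast_nonneg _, ?_⟩
          have hdig : ∀ c ∈ rest.takeWhile Char.isDigit, c.isDigit :=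
            fun c hc => List.mem_takeWhile_imp hc
          rw [pvCand, pvToChars_nonneg _ (Int.natCast_nonneg _), Int.toNat_natCast,
            pvTD_of_canon _ hne hdig hcanon]
          rw [List.cons_prefix_cons, List.cons_prefix_cons]
          refine ⟨rfl, rfl, ?_⟩
          obtain ⟨t, ht⟩ : ∃ t, rest.dropWhile Char.isDigit = 'z' :: t := by
            cases hdw : rest.dropWhile Char.isDigit with
            | nil => rw [hdw] at hz; simp at hz
            | cons a t => rw [hdw] at hz; simp at hz; exact ⟨t, by rw [hz]⟩
          conv_rhs => rw [← List.takeWhile_append_dropWhile (p := Char.isDigit) (l := rest), ht]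
          exact ⟨t, by simp⟩
        · exact absurd h (by simp)
      · rintro ⟨hn, hpre⟩
        rw [pvCand, List.cons_prefix_cons, List.cons_prefix_cons] at hpre
        obtain ⟨-, -, hpre⟩ := hpre
        rw [pvToChars_nonneg n hn] at hpre
        obtain ⟨t, ht⟩ := hpre
        rw [List.append_assoc, List.singleton_append] at ht
        have hdig := pvTD_digits n.toNat
        have hTW : rest.takeWhile Char.isDigit = Nat.toDigits 10 n.toNat := by
          rw [← ht]; exact pvTW _ _ hdig
        have hDW : rest.dropWhile Char.isDigit = 'z' :: t := by
          rw [← ht]; exact pvDW _ _ hdig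
        have hcanon : (rest.takeWhile Char.isDigit).length = 1 ∨
            (rest.takeWhile Char.isDigit).head? ≠ some '0' := by
          rw [hTW]
          rcases Nat.eq_zero_or_pos n.toNat with h0 | h0
          · left; rw [h0]; rfl
          · right; exact pvTD_head _ h0
        rw [if_pos ⟨by rw [hTW]; exact pvTD_ne_nil _, by rw [hDW]; rfl, hcanon⟩]
        rw [hTW, pvTD_val, Int.toNat_of_nonneg hn]
    · rw [pvHead?]
      simp only [if_neg hxq]
      constructor
      · intro h; exact absurd h (by simp)
      · rintro ⟨hn, hpre⟩
        rw [pvCand, List.cons_prefix_cons, List.cons_prefix_cons] at hpre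
        exact absurd ⟨hpre.1.symm, hpre.2.1.symm⟩ hxq

-- ---- the scan finds exactly the candidates that occur as substrings ----
lemma pvScanLine_iff (cs : List Char) (n : Int) :
    n ∈ pvScanLine cs ↔ 0 ≤ n ∧ pvCand n <:+: cs := by
  induction cs with
  | nil =>
    have : pvCand n ≠ [] := by simp [pvCand]
    simp [pvScanLine, List.infix_nil, this]
  | cons c cs ih =>
    have hmem : n ∈ pvScanLine (c :: cs) ↔ pvHead? (c :: cs) = some n ∨ n ∈ pvScanLine cs := by
      rw [pvScanLine]
      cases h : pvHead? (c :: cs) <;> simp [eq_comm]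
    rw [hmem, pvHead?_iff, ih, List.infix_cons_iff]
    tauto

lemma pvScanLine_length (cs : List Char) : (pvScanLine cs).length ≤ cs.length := by
  induction cs with
  | nil => simp [pvScanLine]
  | cons c cs ih =>
    rw [pvScanLine]
    cases pvHead? (c :: cs) <;> simp <;> omega

-- ---- the 'present' set of B ----
def pvPresent (lines : List String) : PySem.Set Int :=
  lines.foldl (fun s line => (pvScanLine line.toList).foldl (fun s v => PySem.Set.add s v) s)
    (PySem.Set.ofList [])

lemma pvAlt_def (lines : List String) :
    generate_unique_placeholder_alt lines =
      String.ofList ('x' :: 'q' ::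
        (PySem.Int.toChars (pvMex (PySem.List.sorted (pvPresent lines) (fun v => v)) 0) ++ ['z'])) := rfl

lemma pvMem_inner (xs : List Int) : ∀ (s : PySem.Set Int) (y : Int),
    y ∈ xs.foldl (fun s v => PySem.Set.add s v) s ↔ y ∈ s ∨ y ∈ xs := by
  induction xs with
  | nil => simp
  | cons x xs ih =>
    intro s y
    rw [List.foldl_cons, ih, PySem.Set.mem_add]
    simp
    tauto

lemma pvNodup_inner (xs : List Int) : ∀ (s : PySem.Set Int), s.Nodup →
    (xs.foldl (fun s v => PySem.Set.add s v) s).Nodup := by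
  induction xs with
  | nil => intro s h; simpa using h
  | cons x xs ih =>
    intro s h
    rw [List.foldl_cons]
    apply ih
    rw [PySem.Set.add.eq_1]
    split
    · exact h
    · next hc =>
      have hx : x ∉ s := by
        intro hm
        rw [PySem.Set.contains_eq_decide] at hc
        simp [hm] at hc
      simp [List.nodup_append, h]
      exact fun a ha hax => hx (hax ▸ ha)

lemma pvLen_inner (xs : List Int) : ∀ (s : PySem.Set Int),
    (xs.foldl (fun s v => PySem.Set.add s v) s).length ≤ s.length + xs.length := by
  induction xs with
  | nil => simp
  | cons x xs ih =>
    intro s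
    rw [List.foldl_cons]
    calc _ ≤ (PySem.Set.add s x).length + xs.length := ih _
    _ ≤ s.length + (x :: xs).length := by
        rw [PySem.Set.add.eq_1]; split <;> simp <;> omega

lemma pvMem_outer (lines : List String) : ∀ (s : PySem.Set Int) (y : Int),
    y ∈ lines.foldl (fun s line => (pvScanLine line.toList).foldl (fun s v => PySem.Set.add s v) s) s
      ↔ y ∈ s ∨ ∃ l ∈ lines, y ∈ pvScanLine l.toList := by
  induction lines with
  | nil => simp
  | cons l lines ih =>
    intro s y
    rw [List.foldl_cons, ih, pvMem_inner]
    simp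
    tauto

lemma pvMem_present (lines : List String) (y : Int) :
    y ∈ pvPresent lines ↔ ∃ l ∈ lines, y ∈ pvScanLine l.toList := by
  rw [pvPresent, pvMem_outer]
  simp [PySem.Set.ofList_nil]

lemma pvNodup_present (lines : List String) : (pvPresent lines).Nodup := by
  rw [pvPresent]
  generalize hs : PySem.Set.ofList ([] : List Int) = s
  have hnd : s.Nodup := by rw [← hs, PySem.Set.ofList_nil]; simp
  clear hs
  induction lines generalizing s with
  | nil => simpa using hnd
  | cons l lines ih =>
    rw [List.foldl_cons]
    exact ih _ (pvNodup_inner _ _ hnd)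

lemma pvLen_present (lines : List String) :
    (pvPresent lines).length ≤ (lines.map (fun l => l.toList.length)).sum := by
  rw [pvPresent]
  have key : ∀ (ls : List String) (s : PySem.Set Int),
      (ls.foldl (fun s line => (pvScanLine line.toList).foldl (fun s v => PySem.Set.add s v) s) s).length
        ≤ s.length + (ls.map (fun l => l.toList.length)).sum := by
    intro ls
    induction ls with
    | nil => simp
    | cons l ls ih =>
      intro s
      rw [List.foldl_cons]
      calc _ ≤ ((pvScanLine l.toList).foldl (fun s v => PySem.Set.add s v) s).length
              + (ls.map (fun l => l.toList.length)).sum := ih _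
      _ ≤ (s.length + (pvScanLine l.toList).length) + (ls.map (fun l => l.toList.length)).sum := by
            have := pvLen_inner (pvScanLine l.toList) s; omega
      _ ≤ _ := by
            have := pvScanLine_length l.toList
            rw [List.map_cons, List.sum_cons]
            omega
  simpa [PySem.Set.ofList_nil] using key lines (PySem.Set.ofList [])

-- ---- the sorted walk computes the least value ≥ k missing from the list ----
lemma pvMex_spec (l : List Int) (hs : List.Pairwise (· < ·) l) : ∀ (k : Int),
    k ≤ pvMex l k ∧ pvMex l k ∉ l ∧ ∀ j, k ≤ j → j < pvMex l k → j ∈ l := by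
  induction l with
  | nil => intro k; exact ⟨le_rfl, by simp [pvMex], fun j h1 h2 => by simp [pvMex] at h2; omega⟩
  | cons v vs ih =>
    have hv : ∀ x ∈ vs, v < x := fun x hx => (List.pairwise_cons.mp hs).1 x hx
    have hp : List.Pairwise (· < ·) vs := (List.pairwise_cons.mp hs).2
    intro k
    rw [pvMex]
    split
    · next he =>
      subst he
      obtain ⟨h1, h2, h3⟩ := ih hp (v + 1)
      refine ⟨by omega, ?_, ?_⟩
      · simp only [List.mem_cons, not_or]
        exact ⟨by omega, h2⟩
      · intro j hj1 hj2
        rcases eq_or_lt_of_le hj1 with rfl | hlt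
        · simp
        · exact List.mem_cons_of_mem _ (h3 j (by omega) hj2)
    · split
      · next hne hlt =>
        refine ⟨le_refl _, ?_, ?_⟩
        · simp only [List.mem_cons, not_or]
          exact ⟨fun h => hne h.symm, fun h => by have := hv k h; omega⟩
        · intro j hj1 hj2; omega
      · next hne hge =>
        obtain ⟨h1, h2, h3⟩ := ih hp k
        refine ⟨h1, ?_, ?_⟩
        · simp only [List.mem_cons, not_or]
          exact ⟨by omega, h2⟩
        · intro j hj1 hj2
          exact List.mem_cons_of_mem _ (h3 j hj1 hj2)

-- ---- A's containment test, expressed through B's scan ----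
lemma pvContains_iff (lines : List String) (n : Int) (hn : 0 ≤ n) :
    (lines.any (fun line =>
        PySem.Str.isIn (String.ofList ('x' :: 'q' :: (PySem.Int.toChars n ++ ['z']))) line) = true)
      ↔ n ∈ pvPresent lines := by
  rw [List.any_eq_true, pvMem_present]
  constructor
  · rintro ⟨l, hl, hin⟩
    refine ⟨l, hl, ?_⟩
    rw [pvScanLine_iff]
    refine ⟨hn, ?_⟩
    have := (PySem.Str.isIn_iff_infix _ _).mp hin
    simpa [pvCand] using this
  · rintro ⟨l, hl, hmem⟩
    refine ⟨l, hl, ?_⟩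
    rw [pvScanLine_iff] at hmem
    rw [PySem.Str.isIn_iff_infix]
    simpa [pvCand] using hmem.2

lemma pvMexBound (M : Int) (P : List Int) (hM0 : 0 ≤ M)
    (hall : ∀ j, 0 ≤ j → j < M → j ∈ P) : M.toNat ≤ P.length := by
  have hndL : ((List.range M.toNat).map (fun i : Nat => (i : Int))).Nodup :=
    List.Nodup.map (fun a b h => by exact_mod_cast h) List.nodup_range
  have hsub : ((List.range M.toNat).map (fun i : Nat => (i : Int))) ⊆ P := by
    intro x hx
    simp only [List.mem_map, List.mem_range] at hx
    obtain ⟨i, hi, rfl⟩ := hx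
    exact hall _ (Int.natCast_nonneg i) (by omega)
  calc M.toNat = ((List.range M.toNat).map (fun i : Nat => (i : Int))).length := by simp
  _ = ((List.range M.toNat).map (fun i : Nat => (i : Int))).toFinset.card :=
      (List.toFinset_card_of_nodup hndL).symm
  _ ≤ P.toFinset.card := Finset.card_le_card (fun x hx => by
      simp only [List.mem_toFinset] at *; exact hsub hx)
  _ ≤ P.length := P.toFinset_card_le

-- ---- A's loop reaches exactly the least missing candidate ----
lemma pvLoopA_eq (lines : List String) (M : Int) (hM0 : 0 ≤ M)
    (hnot : M ∉ pvPresent lines) (hall : ∀ j, 0 ≤ j → j < M → j ∈ pvPresent lines) :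
    ∀ (fuel : Nat) (k : Int), 0 ≤ k → k ≤ M → (M - k).toNat < fuel →
      pvLoopA lines fuel k = String.ofList ('x' :: 'q' :: (PySem.Int.toChars M ++ ['z'])) := by
  intro fuel
  induction fuel with
  | zero => intro k _ _ h; omega
  | succ fuel ih =>
    intro k hk0 hkM hfuel
    rw [pvLoopA]
    rcases eq_or_lt_of_le hkM with rfl | hlt
    · rw [if_neg]
      intro hany
      exact hnot ((pvContains_iff lines k hk0).mp hany)
    · rw [if_pos ((pvContains_iff lines k hk0).mpr (hall k hk0 hlt))]
      exact ih (k + 1) (by omega) (by omega) (by omega)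

-- ===== VERDICT (by name: the statement is the Claim_ definition above) =====
theorem generate_unique_placeholder_spec : Claim_equal_generate_unique_placeholder := by
  unfold Claim_equal_generate_unique_placeholder Spec_generate_unique_placeholder
  intro lines _
  rw [pvAlt_def]
  set P := pvPresent lines with hP
  set L := PySem.List.sorted P (fun v => v) with hL
  have hperm : L.Perm P := PySem.List.sorted_perm P (fun v => v) false
  have hnd : L.Nodup := hperm.nodup_iff.mpr (pvNodup_present lines)
  have hle : List.Pairwise (· ≤ ·) L := PySem.List.sorted_pairwise P (fun v => v)
  have hlt : List.Pairwise (· < ·) L :=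
    List.sortedLT_iff_pairwise.mp
      (List.SortedLE.sortedLT_of_nodup (List.sortedLE_iff_pairwise.mpr hle) hnd)
  obtain ⟨h1, h2, h3⟩ := pvMex_spec L hlt 0
  set M := pvMex L 0 with hM
  have hnot : M ∉ P := fun h => h2 (hperm.mem_iff.mpr h)
  have hall : ∀ j, 0 ≤ j → j < M → j ∈ P :=
    fun j hj1 hj2 => hperm.mem_iff.mp (h3 j hj1 hj2)
  have hbound : M.toNat ≤ (lines.map (fun l => l.toList.length)).sum :=
    le_trans (pvMexBound M P h1 hall) (pvLen_present lines)
  rw [generate_unique_placeholder]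
  exact pvLoopA_eq lines M h1 hnot hall _ 0 le_rfl h1 (by omega)
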